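-- pv_equiv track=rewrite | github.com/Elise-cdr/Projet_Openscience_Genetic_incompatibilities_do_not_snowball_in_a_demographic_model_of_speciation | Orr.py | count_dmis
-- ===== SOURCE A (Python) =====
-- def count_dmis(pop0, pop1, len_genome, DMIs):
--     """
--     Renvoie le nombre de DMIs entre pop0 et pop1
--     """
--     nb_dmis = 0
--     nb_AD = 0
--
--     # On parcourt toutes les paires
--     # Il n'est nécessaire de le faire que dans 1 sens comme on a doublé le dico
--     for loc0 in range(len_genome):
--         for loc1 in range(len_genome):
--             if (loc0,loc1) in DMIs.keys():
--                 if f'{pop0[loc0]}{pop1[loc1]}' == DMIs[(loc0,loc1)]: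
--                     nb_dmis += 1
--                     if '0' in DMIs[(loc0,loc1)]:
--                         nb_AD += 1
--
--     return nb_dmis, nb_AD
-- ===== SOURCE B (Python) =====
-- def count_dmis(pop0, pop1, len_genome, DMIs):
--     """
--     Renvoie le nombre de DMIs entre pop0 et pop1
--     """
--     nb_dmis = 0
--     nb_AD = 0
--     # Iterate directly over the DMI dictionary entries instead of all locus pairs
--     for (loc0, loc1), target in DMIs.items():
--         if 0 <= loc0 < len_genome and 0 <= loc1 < len_genome:
--             if f'{pop0[loc0]}{pop1[loc1]}' == target:
--                 nb_dmis += 1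
--                 if '0' in target:
--                     nb_AD += 1
--     return nb_dmis, nb_AD
-- ===== Notes on version B (the rewrite author's own statement) =====
-- stated objective: faster
-- what changed: Instead of scanning all len_genome^2 locus pairs and probing the dict for each, B iterates once over the DMIs dict entries and range-checks each key, dropping the quadratic grid scan.
import Mathlib
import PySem

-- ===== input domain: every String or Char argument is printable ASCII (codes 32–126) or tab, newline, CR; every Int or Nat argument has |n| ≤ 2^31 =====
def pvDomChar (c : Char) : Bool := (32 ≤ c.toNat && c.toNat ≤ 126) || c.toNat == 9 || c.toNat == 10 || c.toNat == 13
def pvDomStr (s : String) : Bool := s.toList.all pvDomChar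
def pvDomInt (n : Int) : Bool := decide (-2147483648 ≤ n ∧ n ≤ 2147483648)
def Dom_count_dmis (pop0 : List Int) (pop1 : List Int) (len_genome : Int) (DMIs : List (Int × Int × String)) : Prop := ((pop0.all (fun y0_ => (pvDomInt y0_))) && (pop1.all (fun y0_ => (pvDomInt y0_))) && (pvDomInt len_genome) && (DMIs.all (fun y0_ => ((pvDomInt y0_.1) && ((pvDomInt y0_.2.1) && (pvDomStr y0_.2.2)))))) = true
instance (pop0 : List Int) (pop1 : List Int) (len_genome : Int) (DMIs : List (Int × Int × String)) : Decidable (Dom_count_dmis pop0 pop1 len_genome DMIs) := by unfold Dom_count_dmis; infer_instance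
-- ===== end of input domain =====

-- B iterates once over the DMIs dict entries (range-checking each key) instead of
-- probing the dict from every one of the len_genome^2 locus pairs: asymptotically faster.

-- ===== PORT A =====
-- first-match lookup in the association list representing the Python dict
def dmiGet? (DMIs : List (Int × Int × String)) (k : Int × Int) : Option String :=
  match DMIs.find? (fun e => (e.1, e.2.1) == k) with
  | some e => some e.2.2
  | none => none

def count_dmis (pop0 : List Int) (pop1 : List Int) (len_genome : Int) (DMIs : List (Int × Int × String)) : Int × Int :=
  (PySem.List.pyRange 0 len_genome 1).foldl (fun st loc0 =>
    (PySem.List.pyRange 0 len_genome 1).foldl (fun st loc1 =>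
      match dmiGet? DMIs (loc0, loc1) with
      | none => st
      | some v =>
        if (PySem.Int.toStr (PySem.List.pyGetD pop0 loc0 0) ++ PySem.Int.toStr (PySem.List.pyGetD pop1 loc1 0)) == v then
          (st.1 + 1, st.2 + (if PySem.Str.isIn "0" v then 1 else 0))
        else st) st) (0, 0)

-- ===== PORT B =====
def count_dmis_alt (pop0 : List Int) (pop1 : List Int) (len_genome : Int) (DMIs : List (Int × Int × String)) : Int × Int :=
  DMIs.foldl (fun st e =>
    if 0 ≤ e.1 && e.1 < len_genome && 0 ≤ e.2.1 && e.2.1 < len_genome then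
      if (PySem.Int.toStr (PySem.List.pyGetD pop0 e.1 0) ++ PySem.Int.toStr (PySem.List.pyGetD pop1 e.2.1 0)) == e.2.2 then
        (st.1 + 1, st.2 + (if PySem.Str.isIn "0" e.2.2 then 1 else 0))
      else st
    else st) (0, 0)

-- ===== PRECONDITION & SPEC =====
-- Pre_ excludes (a) inputs where Python A raises IndexError: a DMI key (l0,l1) with
-- 0 ≤ l0,l1 < len_genome but l0 ≥ len(pop0) or l1 ≥ len(pop1); and (b) association
-- lists with duplicate DMI keys, which a Python dict cannot represent (the list↔dict
-- correspondence is ambiguous there).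
def Pre_count_dmis (pop0 : List Int) (pop1 : List Int) (len_genome : Int) (DMIs : List (Int × Int × String)) : Prop :=
  (DMIs.map (fun e => (e.1, e.2.1))).Nodup ∧
  ∀ e ∈ DMIs, (0 ≤ e.1 ∧ e.1 < len_genome ∧ 0 ≤ e.2.1 ∧ e.2.1 < len_genome) →
    (e.1 < (pop0.length : Int) ∧ e.2.1 < (pop1.length : Int))
instance (pop0 : List Int) (pop1 : List Int) (len_genome : Int) (DMIs : List (Int × Int × String)) : Decidable (Pre_count_dmis pop0 pop1 len_genome DMIs) := by unfold Pre_count_dmis; infer_instance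

def pvWitness_count_dmis : List Int × List Int × Int × (List (Int × Int × String)) :=
  ([1, 0], [2, 1], 2, [(0, 1, "01"), (1, 0, "02")])

def Spec_count_dmis (pop0 : List Int) (pop1 : List Int) (len_genome : Int) (DMIs : List (Int × Int × String)) (out : Int × Int) : Prop := out = count_dmis_alt pop0 pop1 len_genome DMIs
instance (pop0 : List Int) (pop1 : List Int) (len_genome : Int) (DMIs : List (Int × Int × String)) (out : Int × Int) : Decidable (Spec_count_dmis pop0 pop1 len_genome DMIs out) := by unfold Spec_count_dmis; infer_instance

-- ===== CLAIM (what is proved, stated in full; the proofs are below) =====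
def Claim_equal_count_dmis : Prop := ∀ (pop0 : List Int) (pop1 : List Int) (len_genome : Int) (DMIs : List (Int × Int × String)), Dom_count_dmis pop0 pop1 len_genome DMIs → Pre_count_dmis pop0 pop1 len_genome DMIs → Spec_count_dmis pop0 pop1 len_genome DMIs (count_dmis pop0 pop1 len_genome DMIs)

-- ===== LEMMAS AND PROOFS =====

-- value contributed by a matching DMI entry (proof helper)
def entryVal (pop0 pop1 : List Int) (e : Int × Int × String) : Int × Int :=
  if (PySem.Int.toStr (PySem.List.pyGetD pop0 e.1 0) ++ PySem.Int.toStr (PySem.List.pyGetD pop1 e.2.1 0)) == e.2.2 then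
    (1, if PySem.Str.isIn "0" e.2.2 then 1 else 0)
  else (0, 0)

-- contribution of one DMI entry in B's traversal
def contrib (pop0 pop1 : List Int) (len_genome : Int) (e : Int × Int × String) : Int × Int :=
  if 0 ≤ e.1 && e.1 < len_genome && 0 ≤ e.2.1 && e.2.1 < len_genome then entryVal pop0 pop1 e else (0, 0)

-- contribution of one grid cell in A's traversal
def cell (pop0 pop1 : List Int) (DMIs : List (Int × Int × String)) (l0 l1 : Int) : Int × Int :=
  match dmiGet? DMIs (l0, l1) with
  | none => (0, 0)
  | some v =>
    if (PySem.Int.toStr (PySem.List.pyGetD pop0 l0 0) ++ PySem.Int.toStr (PySem.List.pyGetD pop1 l1 0)) == v then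
      (1, if PySem.Str.isIn "0" v then 1 else 0)
    else (0, 0)

-- an accumulating foldl whose body is "add f x" is init + sum of the images
theorem foldl_add_eq_sum {a : Type} (f : a -> Int × Int) (g : Int × Int -> a -> Int × Int)
    (hg : ∀ st x, g st x = st + f x) : ∀ (l : List a) (st : Int × Int),
    l.foldl g st = st + (l.map f).sum := by
  intro l
  induction l with
  | nil => intro st; simp
  | cons x xs ih => intro st; simp [hg, ih, add_assoc]

-- summing a pointwise update of f over a duplicate-free list
theorem sum_map_update {a : Type} [DecidableEq a] (R : List a) (hR : R.Nodup)
    (f : a -> Int × Int) (p : a) (u : Int × Int) :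
    (R.map (fun x => if x = p then u else f x)).sum
      = (R.map f).sum + (if p ∈ R then u - f p else 0) := by
  induction R with
  | nil => simp
  | cons x xs ih =>
    simp only [List.nodup_cons] at hR
    by_cases hx : x = p
    · subst hx
      have hmap : xs.map (fun y => if y = x then u else f y) = xs.map f := by
        apply List.map_congr_left
        intro y hy
        have : y ≠ x := fun h => hR.1 (h ▸ hy)
        simp [this]
      simp [hmap, List.mem_cons]
      abel
    · have hsum := ih hR.2
      by_cases hp : p ∈ xs
      · simp [hx, hsum, hp, Ne.symm hx]
        abel
      · have : p ∉ x :: xs := by simp [Ne.symm hx, hp]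
        simp [hx, hsum, hp, this]

theorem dmiGet?_nil (k : Int × Int) : dmiGet? [] k = none := rfl

theorem dmiGet?_cons (e : Int × Int × String) (rest : List (Int × Int × String)) (k : Int × Int) :
    dmiGet? (e :: rest) k = if (e.1, e.2.1) = k then some e.2.2 else dmiGet? rest k := by
  simp only [dmiGet?, List.find?_cons]
  by_cases h : (e.1, e.2.1) = k
  · simp [h]
  · have hb : ((e.1, e.2.1) == k) = false := beq_eq_false_iff_ne.mpr h
    simp [hb, h]

theorem dmiGet?_eq_none_of_not_mem (rest : List (Int × Int × String)) (k : Int × Int)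
    (h : k ∉ rest.map (fun e => (e.1, e.2.1))) : dmiGet? rest k = none := by
  induction rest with
  | nil => rfl
  | cons e es ih =>
    simp only [List.map_cons, List.mem_cons] at h
    push_neg at h
    rw [dmiGet?_cons, if_neg (fun hh => h.1 hh.symm)]
    exact ih h.2

-- the central identity: grid sum over the whole range square = entry sum over DMIs
theorem grid_eq_entries (pop0 pop1 : List Int) (n : Int) (DMIs : List (Int × Int × String))
    (hnd : (DMIs.map (fun e => (e.1, e.2.1))).Nodup) :
    ((PySem.List.pyRange 0 n 1).map (fun l0 =>
      ((PySem.List.pyRange 0 n 1).map (fun l1 => cell pop0 pop1 DMIs l0 l1)).sum)).sum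
    = (DMIs.map (contrib pop0 pop1 n)).sum := by
  induction DMIs with
  | nil =>
    simp [cell, dmiGet?_nil]
  | cons e rest ih =>
    simp only [List.map_cons, List.nodup_cons] at hnd
    set R := PySem.List.pyRange 0 n 1 with hRdef
    have hRnd : R.Nodup := PySem.List.nodup_pyRange_one 0 n
    have hmemR : ∀ x : Int, x ∈ R ↔ 0 ≤ x ∧ x < n := by
      intro x; rw [hRdef, PySem.List.mem_pyRange_one]
    -- inner sums
    have hrest0 : cell pop0 pop1 rest e.1 e.2.1 = 0 := by
      simp [cell, dmiGet?_eq_none_of_not_mem rest _ hnd.1]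
    have inner : ∀ l0 ∈ R,
        (R.map (fun l1 => cell pop0 pop1 (e :: rest) l0 l1)).sum
          = (R.map (fun l1 => cell pop0 pop1 rest l0 l1)).sum
            + (if l0 = e.1 then (if e.2.1 ∈ R then entryVal pop0 pop1 e else 0) else 0) := by
      intro l0 _
      by_cases h0 : l0 = e.1
      · have hpt : ∀ l1, cell pop0 pop1 (e :: rest) l0 l1
            = if l1 = e.2.1 then entryVal pop0 pop1 e else cell pop0 pop1 rest l0 l1 := by
          intro l1
          by_cases h1 : l1 = e.2.1
          · simp [cell, dmiGet?_cons, entryVal, h0, h1]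
          · have hk : ¬ ((e.1, e.2.1) = (l0, l1)) := fun h => h1 (congrArg Prod.snd h).symm
            simp [cell, dmiGet?_cons, hk, h1]
        rw [List.map_congr_left (fun l1 _ => hpt l1), sum_map_update R hRnd _ e.2.1 _]
        by_cases h2 : e.2.1 ∈ R
        · simp [h2, h0, hrest0]
        · simp [h2, h0]
      · have hpt : ∀ l1, cell pop0 pop1 (e :: rest) l0 l1 = cell pop0 pop1 rest l0 l1 := by
          intro l1
          have hk : ¬ ((e.1, e.2.1) = (l0, l1)) := fun h => h0 (congrArg Prod.fst h).symm
          simp [cell, dmiGet?_cons, hk]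
        rw [List.map_congr_left (fun l1 _ => hpt l1)]
        simp [h0]
    -- outer sum
    rw [List.map_congr_left inner]
    have hsplit : (R.map (fun l0 =>
        (R.map (fun l1 => cell pop0 pop1 rest l0 l1)).sum
          + (if l0 = e.1 then (if e.2.1 ∈ R then entryVal pop0 pop1 e else 0) else 0))).sum
        = (R.map (fun l0 => (R.map (fun l1 => cell pop0 pop1 rest l0 l1)).sum)).sum
          + (R.map (fun l0 => (if l0 = e.1 then (if e.2.1 ∈ R then entryVal pop0 pop1 e else 0) else 0))).sum := by
      induction R with
      | nil => simp
      | cons x xs ihx => simp [ihx]; abel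
    rw [hsplit, ih hnd.2]
    have hdelta : (R.map (fun l0 => (if l0 = e.1 then (if e.2.1 ∈ R then entryVal pop0 pop1 e else 0) else 0))).sum
        = if e.1 ∈ R then (if e.2.1 ∈ R then entryVal pop0 pop1 e else 0) else 0 := by
      have := sum_map_update R hRnd (fun _ => (0 : Int × Int)) e.1 (if e.2.1 ∈ R then entryVal pop0 pop1 e else 0)
      simpa using this
    rw [hdelta]
    have hcontrib : contrib pop0 pop1 n e
        = if e.1 ∈ R then (if e.2.1 ∈ R then entryVal pop0 pop1 e else 0) else 0 := by
      rw [contrib]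
      by_cases h1 : e.1 ∈ R
      · by_cases h2 : e.2.1 ∈ R
        · have hb1 := (hmemR e.1).1 h1
          have hb2 := (hmemR e.2.1).1 h2
          have hc : (0 ≤ e.1 && e.1 < n && (0 ≤ e.2.1) && e.2.1 < n) = true := by
            simp only [Bool.and_eq_true, decide_eq_true_eq]
            omega
          simp [h1, h2, hc]
        · have hb2 : ¬ (0 ≤ e.2.1 ∧ e.2.1 < n) := fun h => h2 ((hmemR e.2.1).2 h)
          have hc : (0 ≤ e.1 && e.1 < n && (0 ≤ e.2.1) && e.2.1 < n) = false := by
            simp only [Bool.and_eq_false_iff, decide_eq_false_iff_not]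
            omega
          simp [h1, h2, hc]
      · have hb1 : ¬ (0 ≤ e.1 ∧ e.1 < n) := fun h => h1 ((hmemR e.1).2 h)
        have hc : (0 ≤ e.1 && e.1 < n && (0 ≤ e.2.1) && e.2.1 < n) = false := by
          simp only [Bool.and_eq_false_iff, decide_eq_false_iff_not]
          omega
        simp [h1, hc]
    rw [List.map_cons, List.sum_cons, hcontrib]
    abel

theorem count_dmis_eq_grid (pop0 pop1 : List Int) (n : Int) (DMIs : List (Int × Int × String)) :
    count_dmis pop0 pop1 n DMIs
      = ((PySem.List.pyRange 0 n 1).map (fun l0 =>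
          ((PySem.List.pyRange 0 n 1).map (fun l1 => cell pop0 pop1 DMIs l0 l1)).sum)).sum := by
  rw [count_dmis]
  rw [foldl_add_eq_sum (fun l0 => ((PySem.List.pyRange 0 n 1).map (fun l1 => cell pop0 pop1 DMIs l0 l1)).sum)]
  · simp
  · intro st l0
    rw [foldl_add_eq_sum (fun l1 => cell pop0 pop1 DMIs l0 l1)]
    intro st' l1
    rw [cell]
    cases h : dmiGet? DMIs (l0, l1) with
    | none => simp
    | some v =>
      by_cases hs : (PySem.Int.toStr (PySem.List.pyGetD pop0 l0 0) ++ PySem.Int.toStr (PySem.List.pyGetD pop1 l1 0)) == v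
      · simp only [hs, if_true]
        cases st' with
        | mk A B => simp [Prod.add_def]
      · simp only [hs]
        simp at hs
        simp [hs]

theorem count_dmis_alt_eq_sum (pop0 pop1 : List Int) (n : Int) (DMIs : List (Int × Int × String)) :
    count_dmis_alt pop0 pop1 n DMIs = (DMIs.map (contrib pop0 pop1 n)).sum := by
  rw [count_dmis_alt]
  rw [foldl_add_eq_sum (contrib pop0 pop1 n)]
  · simp
  · intro st e
    rw [contrib]
    by_cases hr : (0 ≤ e.1 && e.1 < n && (0 ≤ e.2.1) && e.2.1 < n) = true
    · simp only [hr, if_true]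
      rw [entryVal]
      by_cases hs : (PySem.Int.toStr (PySem.List.pyGetD pop0 e.1 0) ++ PySem.Int.toStr (PySem.List.pyGetD pop1 e.2.1 0)) == e.2.2
      · simp only [hs, if_true]
        cases st with
        | mk A B => simp [Prod.add_def]
      · simp only [hs]
        simp at hs
        simp [hs]
    · simp only [Bool.not_eq_true] at hr
      simp [hr]

-- ===== VERDICT (by name: the statement is the Claim_ definition above) =====
theorem count_dmis_spec : Claim_equal_count_dmis := by
  intro pop0 pop1 len_genome DMIs _ hpre
  unfold Spec_count_dmis
  rw [count_dmis_eq_grid, count_dmis_alt_eq_sum, grid_eq_entries pop0 pop1 len_genome DMIs hpre.1]
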